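-- pv_equiv track=rewrite | github.com/kasanryukin/nesiadmud | lib/pymodules/entities/entity_config_olc.py | format_tabular_list
-- ===== SOURCE A (Python) =====
-- def format_tabular_list(items, markers=None, line_width=78):
--     """Format a list of items in tabular format with optional markers"""
--     if not items:
--         return "  (none)\n"
--
--     # Calculate the width needed for each item (including marker and spacing)
--     max_item_width = max(len(item) for item in items)
--     marker_width = 2 if markers else 0  # "* " or "  "
--     spacing = 2  # Space between columns
--     column_width = max_item_width + marker_width + spacing
--
--     # Calculate how many columns fit in the line width
--     cols_per_line = max(1, (line_width - 2) // column_width)  # -2 for leading spaces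
--
--     result = ""
--     sorted_items = sorted(items)
--
--     for i in range(0, len(sorted_items), cols_per_line):
--         line_items = sorted_items[i:i + cols_per_line]
--         line = "  "
--
--         for item in line_items:
--             if markers and item in markers:
--                 marker = markers[item]
--                 if marker == "*":
--                     # Color the asterisk cyan and the item white
--                     formatted_item = ("{c" + marker + "{w" + item).ljust(column_width + 8)  # +8 for color codes
--                 else:
--                     formatted_item = ("{w " + item).ljust(column_width + 4)  # +4 for color codes
--             else:
--                 marker = " " if markers else ""
--                 formatted_item = ("{w" + marker + item).ljust(column_width + 4)
--
--             line += formatted_item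
--
--         result += line.rstrip() + "{n\n"
--
--     return result
-- ===== SOURCE B (Python) =====
-- def format_tabular_list(items, markers=None, line_width=78):
--     """Format a list of items in tabular format with optional markers"""
--     if not items:
--         return "  (none)\n"
--
--     width = max(len(it) for it in items)
--     mw = 2 if markers else 0
--     cw = width + mw + 2
--     cols = max(1, (line_width - 2) // cw)
--
--     def cell(item):
--         if markers and item in markers:
--             if markers[item] == "*":
--                 return ("{c*{w" + item).ljust(cw + 8)
--             return ("{w " + item).ljust(cw + 4)
--         return ("{w" + (" " if markers else "") + item).ljust(cw + 4)
--
--     out = []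
--     row = []
--     for it in sorted(items):
--         row.append(cell(it))
--         if len(row) == cols:
--             out.append(("  " + "".join(row)).rstrip() + "{n\n")
--             row = []
--     if row:
--         out.append(("  " + "".join(row)).rstrip() + "{n\n")
--     return "".join(out)
-- ===== Notes on version B (the rewrite author's own statement) =====
-- stated objective: alternative
-- what changed: B first maps the sorted items to fully-formatted cell strings, then assembles lines with a single-pass row accumulator that flushes every cols_per_line cells, instead of A's outer index loop over range(0, len, cols) with slicing and an inner string-accumulating loop.
import Mathlib
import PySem

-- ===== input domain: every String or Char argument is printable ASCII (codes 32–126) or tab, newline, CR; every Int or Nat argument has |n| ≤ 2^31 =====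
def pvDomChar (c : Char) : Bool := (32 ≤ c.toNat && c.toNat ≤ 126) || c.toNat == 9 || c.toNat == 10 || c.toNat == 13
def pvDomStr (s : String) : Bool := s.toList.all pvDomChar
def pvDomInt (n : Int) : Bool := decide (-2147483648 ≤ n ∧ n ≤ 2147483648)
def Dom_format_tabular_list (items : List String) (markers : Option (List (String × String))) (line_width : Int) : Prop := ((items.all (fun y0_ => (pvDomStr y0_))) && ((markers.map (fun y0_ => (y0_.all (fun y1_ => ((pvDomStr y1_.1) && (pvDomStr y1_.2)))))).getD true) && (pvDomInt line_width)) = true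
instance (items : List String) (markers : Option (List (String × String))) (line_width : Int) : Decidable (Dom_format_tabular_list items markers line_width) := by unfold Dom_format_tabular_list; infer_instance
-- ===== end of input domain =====

-- ===== PORT A =====
-- B changes only the assembly: cells first, then a row-accumulator pass (objective: alternative decomposition, same cost).
-- Strings are handled as List Char via PySem.Chars (exact on the ASCII domain).
def pvLjust (cs : List Char) (w : Int) : List Char :=
  cs ++ List.replicate (w - (cs.length : Int)).toNat ' '

def format_tabular_list (items : List String) (markers : Option (List (String × String))) (line_width : Int) : String :=
  if items = [] then "  (none)\n" else
  let max_item_width : Int := ((PySem.List.max? (items.map (fun item => PySem.Str.len item)) (fun x => x)).getD 0)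
  let mtruthy : Bool := !(markers.getD []).isEmpty
  let marker_width : Int := if mtruthy then 2 else 0
  let spacing : Int := 2
  let column_width : Int := max_item_width + marker_width + spacing
  let cols_per_line : Int := max 1 (PySem.Int.floordiv (line_width - 2) column_width)
  let d : PySem.Dict String String := PySem.Dict.mk (markers.getD [])
  let sorted_items := PySem.List.sorted items (fun x => x) false
  let result : List Char :=
    (PySem.List.pyRange 0 (sorted_items.length : Int) cols_per_line).foldl
      (fun result i =>
        let line_items := PySem.List.slice sorted_items (some i) (some (i + cols_per_line))
        let line : List Char :=
          line_items.foldl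
            (fun line item =>
              line ++
                (if mtruthy && d.contains item then
                   let marker := (d.get? item).getD ""
                   if marker = "*" then
                     pvLjust ("{c".toList ++ marker.toList ++ "{w".toList ++ item.toList) (column_width + 8)
                   else
                     pvLjust ("{w ".toList ++ item.toList) (column_width + 4)
                 else
                   let marker : String := if mtruthy then " " else ""
                   pvLjust ("{w".toList ++ marker.toList ++ item.toList) (column_width + 4)))
            "  ".toList
        result ++ (PySem.Chars.rstrip line ++ "{n\n".toList))
      []
  String.ofList result

-- ===== PORT B =====
def pvCell (d : PySem.Dict String String) (mtruthy : Bool) (cw : Int) (item : String) : List Char :=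
  if mtruthy && d.contains item then
    if (d.get? item).getD "" = "*" then
      pvLjust ("{c*{w".toList ++ item.toList) (cw + 8)
    else
      pvLjust ("{w ".toList ++ item.toList) (cw + 4)
  else
    pvLjust ("{w".toList ++ (if mtruthy then " ".toList else "".toList) ++ item.toList) (cw + 4)

def pvLine (row : List (List Char)) : List Char :=
  PySem.Chars.rstrip ("  ".toList ++ PySem.Chars.join [] row) ++ "{n\n".toList

def format_tabular_list_alt (items : List String) (markers : Option (List (String × String))) (line_width : Int) : String :=
  if items = [] then "  (none)\n" else
  let max_item_width : Int := ((PySem.List.max? (items.map (fun item => PySem.Str.len item)) (fun x => x)).getD 0)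
  let mtruthy : Bool := !(markers.getD []).isEmpty
  let marker_width : Int := if mtruthy then 2 else 0
  let spacing : Int := 2
  let column_width : Int := max_item_width + marker_width + spacing
  let cols_per_line : Int := max 1 (PySem.Int.floordiv (line_width - 2) column_width)
  let d : PySem.Dict String String := PySem.Dict.mk (markers.getD [])
  let cells : List (List Char) :=
    (PySem.List.sorted items (fun x => x) false).map (pvCell d mtruthy column_width)
  let p : List Char × List (List Char) :=
    cells.foldl
      (fun p cl =>
        let row := p.2 ++ [cl]
        if ((row.length : Int) = cols_per_line) then (p.1 ++ pvLine row, []) else (p.1, row))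
      ([], [])
  String.ofList (if p.2 = [] then p.1 else p.1 ++ pvLine p.2)

-- ===== PRECONDITION & SPEC =====
def Spec_format_tabular_list (items : List String) (markers : Option (List (String × String))) (line_width : Int) (out : String) : Prop := out = format_tabular_list_alt items markers line_width
instance (items : List String) (markers : Option (List (String × String))) (line_width : Int) (out : String) : Decidable (Spec_format_tabular_list items markers line_width out) := by unfold Spec_format_tabular_list; infer_instance

-- ===== CLAIM (what is proved, stated in full; the proofs are below) =====
def Claim_equal_format_tabular_list : Prop := ∀ (items : List String) (markers : Option (List (String × String))) (line_width : Int), Dom_format_tabular_list items markers line_width → Spec_format_tabular_list items markers line_width (format_tabular_list items markers line_width)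

-- ===== LEMMAS AND PROOFS =====

-- chunking: split a list into consecutive groups of (max c 1), format each group with h
def pvChunks {α : Type} (c : Nat) (h : List α → List Char) : List α → List Char
  | [] => []
  | x :: xs => h ((x :: xs).take (max c 1)) ++ pvChunks c h ((x :: xs).drop (max c 1))
  termination_by l => l.length
  decreasing_by simp only [List.length_drop, List.length_cons]; omega

theorem pvChunks_nil {α : Type} (c : Nat) (h : List α → List Char) : pvChunks c h [] = [] := by
  simp only [pvChunks]

theorem pvChunks_cons {α : Type} (c : Nat) (hc : 0 < c) (h : List α → List Char)
    (x : α) (xs : List α) :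
    pvChunks c h (x :: xs) = h ((x :: xs).take c) ++ pvChunks c h ((x :: xs).drop c) := by
  have hmax : max c 1 = c := by omega
  rw [pvChunks, hmax]

theorem pvChunks_congr {α : Type} (c : Nat) (h h' : List α → List Char)
    (hh : ∀ ch, h ch = h' ch) (xs : List α) : pvChunks c h xs = pvChunks c h' xs := by
  have : h = h' := funext hh
  rw [this]

theorem pvChunks_map {α β : Type} (c : Nat) (hc : 0 < c) (H : List β → List Char)
    (f : α → β) (xs : List α) :
    pvChunks c (fun ch => H (ch.map f)) xs = pvChunks c H (xs.map f) := by
  induction hn : xs.length using Nat.strong_induction_on generalizing xs with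
  | _ n ih =>
    cases xs with
    | nil => simp [pvChunks_nil]
    | cons x t =>
      rw [pvChunks_cons c hc _ x t, List.map_cons, pvChunks_cons c hc H,
        ← List.map_cons (f := f) (a := x) (l := t), ← List.map_take, ← List.map_drop]
      have hlen : ((x :: t).drop c).length < n := by
        subst hn; simp only [List.length_drop, List.length_cons]; omega
      rw [ih _ hlen _ rfl]

-- the join with an empty separator is flatten
theorem pvJoin_nil_sep (rows : List (List Char)) : PySem.Chars.join [] rows = rows.flatten := by
  induction rows with
  | nil => simp [PySem.Chars.join_nil]
  | cons a t ih =>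
    cases t with
    | nil => simp [PySem.Chars.join_singleton]
    | cons b u =>
      rw [PySem.Chars.join_cons_cons]
      simp at ih ⊢
      exact ih

-- A's outer loop, in Nat-range form, computes the chunked join
theorem pv_foldA_nat {α : Type} (c : Nat) (hc : 0 < c) (h : List α → List Char)
    (xs : List α) (init : List Char) :
    (List.range ((xs.length + c - 1) / c)).foldl
      (fun r k => r ++ h ((xs.drop (c * k)).take c)) init
    = init ++ pvChunks c h xs := by
  cases hxs : xs with
  | nil =>
    have : (0 + c - 1) / c = 0 := Nat.div_eq_of_lt (by omega)
    simp [pvChunks_nil]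
  | cons x t =>
    have hm : ((x :: t).length + c - 1) / c = (((x :: t).drop c).length + c - 1) / c + 1 := by
      simp only [List.length_drop, List.length_cons]
      rcases Nat.lt_or_ge (t.length + 1) c with hlt | hge
      · have h1 : t.length + 1 - c = 0 := by omega
        have h2 : (0 + c - 1) / c = 0 := Nat.div_eq_of_lt (by omega)
        have h3 : (t.length + 1 + c - 1) / c = 1 :=
          Nat.div_eq_of_lt_le (by omega) (by omega)
        rw [h1, h2, h3]
      · have h2 : t.length + 1 + c - 1 = ((t.length + 1 - c) + c - 1) + c := by omega
        rw [h2, Nat.add_div_right _ hc]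
    rw [hm, List.range_succ_eq_map, List.foldl_cons, List.foldl_map]
    have hbody : ∀ (r : List Char) (k : Nat),
        r ++ h (((x :: t).drop (c * (k + 1))).take c)
        = r ++ h ((((x :: t).drop c).drop (c * k)).take c) := by
      intro r k
      rw [List.drop_drop]
      have : c + c * k = c * (k + 1) := by ring
      rw [this]
    have := pv_foldA_nat c hc h ((x :: t).drop c) (init ++ h (((x :: t).drop (c * 0)).take c))
    simp only [Nat.mul_zero, List.drop_zero] at this ⊢
    calc (List.range ((((x :: t).drop c).length + c - 1) / c)).foldl
            (fun r k => r ++ h (((x :: t).drop (c * (k + 1))).take c))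
            (init ++ h ((x :: t).take c))
        = (List.range ((((x :: t).drop c).length + c - 1) / c)).foldl
            (fun r k => r ++ h ((((x :: t).drop c).drop (c * k)).take c))
            (init ++ h ((x :: t).take c)) := by
          apply PySem.List.foldl_congr_mem
          intro r k _
          exact hbody r k
      _ = init ++ h ((x :: t).take c) ++ pvChunks c h ((x :: t).drop c) := this
      _ = init ++ pvChunks c h (x :: t) := by
          rw [pvChunks_cons c hc h x t, List.append_assoc]
  termination_by xs.length
  decreasing_by simp only [List.length_drop, List.length_cons]; omega

-- bridge: A's pyRange/slice loop equals the Nat-range form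
theorem pv_bridgeA {α : Type} (cI : Int) (hc : 1 ≤ cI) (h : List α → List Char)
    (xs : List α) (init : List Char) :
    (PySem.List.pyRange 0 (xs.length : Int) cI).foldl
      (fun r i => r ++ h (PySem.List.slice xs (some i) (some (i + cI)))) init
    = init ++ pvChunks cI.toNat h xs := by
  have hc0 : (0 : Int) < cI := by omega
  have hcn : ((cI.toNat : Int)) = cI := Int.toNat_of_nonneg (by omega)
  rw [PySem.List.pyRange_of_pos _ _ hc0]
  have hM : (if (0 : Int) < (xs.length : Int) then (((xs.length : Int) - 0 + cI - 1) / cI).toNat else 0)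
      = (xs.length + cI.toNat - 1) / cI.toNat := by
    by_cases hx : (0 : Int) < (xs.length : Int)
    · rw [if_pos hx]
      have h1 : (xs.length : Int) - 0 + cI - 1 = ((xs.length + cI.toNat - 1 : Nat) : Int) := by
        push_cast [Nat.cast_sub (by omega : 1 ≤ xs.length + cI.toNat)]
        omega
      have key : ∀ (a : Nat), ((a : Int) / cI).toNat = a / cI.toNat := by
        intro a
        conv_lhs => rw [← hcn]
        rw [← Int.natCast_ediv, Int.toNat_natCast]
      rw [h1, key]
    · rw [if_neg hx]
      have h0 : xs.length = 0 := by omega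
      rw [h0]
      exact (Nat.div_eq_of_lt (by omega)).symm
  rw [hM, List.foldl_map]
  have hbody : ∀ (r : List Char) (k : Nat), k ∈ List.range ((xs.length + cI.toNat - 1) / cI.toNat) →
      r ++ h (PySem.List.slice xs (some (0 + cI * (k : Int))) (some (0 + cI * (k : Int) + cI)))
      = r ++ h ((xs.drop (cI.toNat * k)).take cI.toNat) := by
    intro r k _
    rw [PySem.List.slice_toNat]
    have e1 : (0 : Int) + cI * (k : Int) = ((cI.toNat * k : Nat) : Int) := by
      push_cast [hcn]; ring
    have e2 : (0 : Int) + cI * (k : Int) + cI = ((cI.toNat * k + cI.toNat : Nat) : Int) := by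
      push_cast [hcn]; ring
    rw [e2, e1, Int.toNat_natCast, Int.toNat_natCast]
    have e3 : cI.toNat * k + cI.toNat - cI.toNat * k = cI.toNat := by omega
    rw [e3]
    · have hk := mul_nonneg hc0.le (Int.natCast_nonneg k)
      linarith
    · have hk := mul_nonneg hc0.le (Int.natCast_nonneg k)
      linarith
  rw [PySem.List.foldl_congr_mem _ _ _ _ hbody]
  exact pv_foldA_nat cI.toNat (by omega) h xs init


-- a full first group splits off the front of the chunking
theorem pvChunks_append_full {α : Type} (c : Nat) (hc : 0 < c) (h : List α → List Char)
    (ys zs : List α) (hlen : ys.length = c) :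
    pvChunks c h (ys ++ zs) = h ys ++ pvChunks c h zs := by
  cases ys with
  | nil => simp at hlen; omega
  | cons y ys' =>
    rw [List.cons_append, pvChunks_cons c hc h y (ys' ++ zs), ← List.cons_append,
      ← hlen, List.take_left, List.drop_left]

-- B's row-accumulator pass computes the chunked join
theorem pv_foldB (cI : Int) (hc : 1 ≤ cI) (cells : List (List Char))
    (out : List Char) (row : List (List Char)) (hrow : row.length < cI.toNat) :
    (if (cells.foldl
          (fun (p : List Char × List (List Char)) cl =>
            if (((p.2 ++ [cl]).length : Int) = cI) then (p.1 ++ pvLine (p.2 ++ [cl]), []) else (p.1, p.2 ++ [cl]))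
          (out, row)).2 = []
     then (cells.foldl
          (fun (p : List Char × List (List Char)) cl =>
            if (((p.2 ++ [cl]).length : Int) = cI) then (p.1 ++ pvLine (p.2 ++ [cl]), []) else (p.1, p.2 ++ [cl]))
          (out, row)).1
     else (cells.foldl
          (fun (p : List Char × List (List Char)) cl =>
            if (((p.2 ++ [cl]).length : Int) = cI) then (p.1 ++ pvLine (p.2 ++ [cl]), []) else (p.1, p.2 ++ [cl]))
          (out, row)).1 ++ pvLine (cells.foldl
          (fun (p : List Char × List (List Char)) cl =>
            if (((p.2 ++ [cl]).length : Int) = cI) then (p.1 ++ pvLine (p.2 ++ [cl]), []) else (p.1, p.2 ++ [cl]))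
          (out, row)).2)
    = out ++ pvChunks cI.toNat pvLine (row ++ cells) := by
  induction cells generalizing out row with
  | nil =>
    simp only [List.foldl_nil, List.append_nil]
    by_cases hr : row = []
    · simp [hr, pvChunks_nil]
    · rw [if_neg hr]
      cases hrow' : row with
      | nil => exact absurd hrow' hr
      | cons r0 rt =>
        rw [pvChunks_cons cI.toNat (by omega) pvLine r0 rt,
          List.take_of_length_le (by rw [← hrow']; omega),
          List.drop_eq_nil_of_le (by rw [← hrow']; omega),
          pvChunks_nil, List.append_nil, ← hrow']
  | cons cl rest ih =>
    simp only [List.foldl_cons]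
    by_cases hfull : (((row ++ [cl]).length : Int) = cI)
    · rw [if_pos hfull, ih (out ++ pvLine (row ++ [cl])) [] (by simp; omega)]
      have hlen : (row ++ [cl]).length = cI.toNat := by
        simp only [List.length_append, List.length_cons, List.length_nil] at hfull ⊢
        omega
      rw [show row ++ cl :: rest = (row ++ [cl]) ++ rest by simp,
        pvChunks_append_full cI.toNat (by omega) pvLine _ _ hlen, List.append_assoc,
        List.nil_append]
    · have hlt : (row ++ [cl]).length < cI.toNat := by
        simp only [List.length_append, List.length_cons, List.length_nil] at hfull ⊢
        omega
      rw [if_neg hfull, ih out (row ++ [cl]) hlt]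
      simp

-- A's inline cell expression is B's pvCell
theorem pv_cellA_eq (d : PySem.Dict String String) (mv : Bool) (cw : Int) (item : String) :
    (if mv && d.contains item then
       let marker := (d.get? item).getD ""
       if marker = "*" then
         pvLjust ("{c".toList ++ marker.toList ++ "{w".toList ++ item.toList) (cw + 8)
       else
         pvLjust ("{w ".toList ++ item.toList) (cw + 4)
     else
       let marker : String := if mv then " " else ""
       pvLjust ("{w".toList ++ marker.toList ++ item.toList) (cw + 4))
    = pvCell d mv cw item := by
  unfold pvCell
  by_cases hmem : (mv && d.contains item) = true
  · rw [if_pos hmem, if_pos hmem]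
    simp only []
    by_cases hstar : (d.get? item).getD "" = "*"
    · rw [if_pos hstar, if_pos hstar, hstar]
      have : ("{c".toList ++ "*".toList ++ "{w".toList : List Char) = "{c*{w".toList := by decide
      rw [← this]
    · rw [if_neg hstar, if_neg hstar]
  · rw [if_neg hmem, if_neg hmem]
    cases mv with
    | false => rfl
    | true => rfl

-- A's per-chunk line equals pvLine on the mapped cells
theorem pv_lineA_eq (d : PySem.Dict String String) (mv : Bool) (cw : Int) (ch : List String) :
    PySem.Chars.rstrip
        (ch.foldl
          (fun line item =>
            line ++
              (if mv && d.contains item then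
                 let marker := (d.get? item).getD ""
                 if marker = "*" then
                   pvLjust ("{c".toList ++ marker.toList ++ "{w".toList ++ item.toList) (cw + 8)
                 else
                   pvLjust ("{w ".toList ++ item.toList) (cw + 4)
               else
                 let marker : String := if mv then " " else ""
                 pvLjust ("{w".toList ++ marker.toList ++ item.toList) (cw + 4)))
          "  ".toList) ++ "{n\n".toList
    = pvLine (ch.map (pvCell d mv cw)) := by
  rw [PySem.List.foldl_append_eq_flatMap _ ch "  ".toList]
  have hcell : (fun item =>
      (if mv && d.contains item then
         let marker := (d.get? item).getD ""
         if marker = "*" then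
           pvLjust ("{c".toList ++ marker.toList ++ "{w".toList ++ item.toList) (cw + 8)
         else
           pvLjust ("{w ".toList ++ item.toList) (cw + 4)
       else
         let marker : String := if mv then " " else ""
         pvLjust ("{w".toList ++ marker.toList ++ item.toList) (cw + 4)))
      = pvCell d mv cw := funext (pv_cellA_eq d mv cw)
  rw [hcell, pvLine, pvJoin_nil_sep, ← List.flatMap_def]

-- the whole body after the widths are fixed
theorem pv_master (d : PySem.Dict String String) (mv : Bool) (cw cols : Int)
    (hcols : 1 ≤ cols) (xs : List String) :
    (PySem.List.pyRange 0 (xs.length : Int) cols).foldl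
      (fun result i =>
        result ++
          (PySem.Chars.rstrip
              ((PySem.List.slice xs (some i) (some (i + cols))).foldl
                (fun line item =>
                  line ++
                    (if mv && d.contains item then
                       let marker := (d.get? item).getD ""
                       if marker = "*" then
                         pvLjust ("{c".toList ++ marker.toList ++ "{w".toList ++ item.toList) (cw + 8)
                       else
                         pvLjust ("{w ".toList ++ item.toList) (cw + 4)
                     else
                       let marker : String := if mv then " " else ""
                       pvLjust ("{w".toList ++ marker.toList ++ item.toList) (cw + 4)))
                "  ".toList) ++ "{n\n".toList))
      []
    = (if ((xs.map (pvCell d mv cw)).foldl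
          (fun (p : List Char × List (List Char)) cl =>
            if (((p.2 ++ [cl]).length : Int) = cols) then (p.1 ++ pvLine (p.2 ++ [cl]), []) else (p.1, p.2 ++ [cl]))
          ([], [])).2 = []
       then ((xs.map (pvCell d mv cw)).foldl
          (fun (p : List Char × List (List Char)) cl =>
            if (((p.2 ++ [cl]).length : Int) = cols) then (p.1 ++ pvLine (p.2 ++ [cl]), []) else (p.1, p.2 ++ [cl]))
          ([], [])).1
       else ((xs.map (pvCell d mv cw)).foldl
          (fun (p : List Char × List (List Char)) cl =>
            if (((p.2 ++ [cl]).length : Int) = cols) then (p.1 ++ pvLine (p.2 ++ [cl]), []) else (p.1, p.2 ++ [cl]))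
          ([], [])).1 ++ pvLine ((xs.map (pvCell d mv cw)).foldl
          (fun (p : List Char × List (List Char)) cl =>
            if (((p.2 ++ [cl]).length : Int) = cols) then (p.1 ++ pvLine (p.2 ++ [cl]), []) else (p.1, p.2 ++ [cl]))
          ([], [])).2) := by
  refine Eq.trans (pv_bridgeA cols hcols (fun ch =>
      PySem.Chars.rstrip
          (ch.foldl
            (fun line item =>
              line ++
                (if mv && d.contains item then
                   let marker := (d.get? item).getD ""
                   if marker = "*" then
                     pvLjust ("{c".toList ++ marker.toList ++ "{w".toList ++ item.toList) (cw + 8)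
                   else
                     pvLjust ("{w ".toList ++ item.toList) (cw + 4)
                 else
                   let marker : String := if mv then " " else ""
                   pvLjust ("{w".toList ++ marker.toList ++ item.toList) (cw + 4)))
            "  ".toList) ++ "{n\n".toList) xs []) ?_
  rw [List.nil_append]
  rw [pvChunks_congr cols.toNat _ _ (pv_lineA_eq d mv cw) xs]
  rw [pvChunks_map cols.toNat (by omega) pvLine (pvCell d mv cw) xs]
  rw [pv_foldB cols hcols (xs.map (pvCell d mv cw)) [] [] (by simp; omega)]
  simp

-- ===== VERDICT (by name: the statement is the Claim_ definition above) =====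
theorem format_tabular_list_spec : Claim_equal_format_tabular_list := by
  unfold Claim_equal_format_tabular_list
  intro items markers line_width _
  unfold Spec_format_tabular_list format_tabular_list format_tabular_list_alt
  by_cases hitems : items = []
  · rw [if_pos hitems, if_pos hitems]
  · rw [if_neg hitems, if_neg hitems]
    dsimp only
    congr 1
    exact pv_master _ _ _ _ (le_max_left 1 _) _
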